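-- pv_equiv track=rewrite | github.com/HappyRocky/pythonAI | LeetCode/29_Divide_Two_Integers.py | divide2
-- ===== SOURCE A (Python) =====
-- def divide2(dividend, divisor):
--     """
--     :type dividend: int
--     :type divisor: int
--     :rtype: int
--     改进版。
--     每次并不是只加一个除数，而是可以一次性加上n个除数，减少时间复杂度。
--     当然，前提是需要知道这n个除数之和，这个可以从前面的结果直接得到。
--     """
--     if dividend == 0:
--         return 0
--
--     #是否是正数
--     is_positive = (dividend > 0 and divisor > 0) or (dividend < 0 and divisor < 0)
--
--     dividend = abs(dividend)
--     divisor = abs(divisor)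
--     result = 0 # 除数的个数
--     sum = 0 # 除数累加结果
--     sum_list = [(1, divisor)] # 存放二元元组，第一位为一个正整数n，第二位为n个除数之和。
--     while(True):
--         have_pop = False
--         while sum_list and sum + sum_list[-1][1] > dividend: # 优先累加最大的数，如果超过被除数，则改为较小数
--             sum_list.pop()
--             have_pop = True
--         if not sum_list: # 所有可用加数都会溢出，则说明距离被除数的差已经不足一个除数了
--             break
--         sum += sum_list[-1][1]
--         result += sum_list[-1][0]
--         if not have_pop:
--             sum_list.append((sum_list[-1][0]<<1, sum_list[-1][1]<<1))
--     if not is_positive: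
--         result = -result
--     if result < -2**31 or result > 2**31 - 1:
--         result = 2**31 - 1
--     return result
-- ===== SOURCE B (Python) =====
-- def divide2(dividend, divisor):
--     if dividend == 0:
--         return 0
--     neg = (dividend > 0) != (divisor > 0)
--     a = abs(dividend)
--     b = abs(divisor)
--     # find the largest shift i with (b << (i+1)) <= a, then scan bits high-to-low
--     i = 0
--     while (b << (i + 1)) <= a:
--         i += 1
--     rem = a
--     q = 0
--     while i >= 0:
--         if (b << i) <= rem:
--             rem -= b << i
--             q += 1 << i
--         i -= 1
--     result = -q if neg else q
--     if result < -2**31 or result > 2**31 - 1: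
--         result = 2**31 - 1
--     return result
-- ===== Notes on version B (the rewrite author's own statement) =====
-- stated objective: alternative
-- what changed: Replaces A's stack of doubled (count, multiple) pairs that is pushed/popped while accumulating a running sum with a top-down bit scan: find the highest shift i with (divisor<<(i+1)) <= |dividend|, then walk i down to 0 subtracting shifted divisors from a remainder and setting quotient bits; Pre_ excludes divisor==0 with dividend!=0, where both programs loop forever.
import Mathlib
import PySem

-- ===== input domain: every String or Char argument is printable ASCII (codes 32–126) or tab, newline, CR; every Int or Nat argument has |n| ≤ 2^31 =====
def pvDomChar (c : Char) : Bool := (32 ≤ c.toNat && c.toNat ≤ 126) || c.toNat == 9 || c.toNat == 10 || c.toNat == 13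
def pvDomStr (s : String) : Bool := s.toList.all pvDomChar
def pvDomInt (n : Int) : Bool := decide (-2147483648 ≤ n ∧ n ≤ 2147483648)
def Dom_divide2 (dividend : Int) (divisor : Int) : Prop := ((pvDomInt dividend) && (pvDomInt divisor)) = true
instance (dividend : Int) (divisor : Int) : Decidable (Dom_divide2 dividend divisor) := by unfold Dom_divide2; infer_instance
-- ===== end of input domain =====

-- B replaces A's doubling stack of (count, sum-of-divisors) pairs with a top-down bit scan
-- keeping only a remainder and a quotient (alternative decomposition, no asymptotic change).

-- ===== PORT A =====
-- Python's sum_list is used as a stack at its END; we keep the stack TOP AT HEAD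
-- (append = cons, pop = tail), which preserves every value pushed/popped and compared.
-- The inner `while sum_list and sum + sum_list[-1][1] > dividend: pop` loop:
def pvPopA (a sum : Int) : List (Int × Int) → Bool → (List (Int × Int) × Bool)
  | [], hp => ([], hp)
  | (n, s) :: t, hp => if sum + s > a then pvPopA a sum t true else ((n, s) :: t, hp)

-- The outer `while True` loop; Python's loop terminates because `sum` grows by at least
-- `divisor ≥ 1` per iteration and stays ≤ `dividend`, so fuel `a.toNat + 1` is never
-- exhausted (proved below); `<< 1` is ported as `2 * ·`.
def pvOuterA (a : Int) : Nat → Int → Int → List (Int × Int) → Int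
  | 0, _, result, _ => result
  | fuel + 1, sum, result, stack =>
    match pvPopA a sum stack false with
    | ([], _) => result
    | ((n, s) :: t, hp) =>
      pvOuterA a fuel (sum + s) (result + n)
        (if hp then (n, s) :: t else (2 * n, 2 * s) :: (n, s) :: t)

def divide2 (dividend : Int) (divisor : Int) : Int :=
  if dividend = 0 then 0
  else
    let isPositive := (decide (dividend > 0) && decide (divisor > 0))
                   || (decide (dividend < 0) && decide (divisor < 0))
    let a := |dividend|
    let b := |divisor|
    let result := pvOuterA a (a.toNat + 1) 0 0 [(1, b)]
    let result := if isPositive then result else -result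
    if result < -2 ^ 31 ∨ result > 2 ^ 31 - 1 then 2 ^ 31 - 1 else result

-- ===== PORT B =====
-- `while (b << (i+1)) <= a: i += 1`; terminates since 2^i outgrows a, fuel a.toNat+1 suffices.
def pvFindK (a b : Int) : Nat → Nat → Nat
  | 0, i => i
  | fuel + 1, i => if b * 2 ^ (i + 1) ≤ a then pvFindK a b fuel (i + 1) else i

-- `while i >= 0: if (b << i) <= rem: rem -= b << i; q += 1 << i; i -= 1` (b << i = b * 2^i)
def pvBitsB (b : Int) : Nat → Int → Int → Int
  | 0, rem, q => if b ≤ rem then q + 1 else q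
  | i + 1, rem, q =>
    if b * 2 ^ (i + 1) ≤ rem then pvBitsB b i (rem - b * 2 ^ (i + 1)) (q + 2 ^ (i + 1))
    else pvBitsB b i rem q

def divide2_alt (dividend : Int) (divisor : Int) : Int :=
  if dividend = 0 then 0
  else
    let neg := decide (dividend > 0) != decide (divisor > 0)
    let a := |dividend|
    let b := |divisor|
    let k := pvFindK a b (a.toNat + 1) 0
    let q := pvBitsB b k a 0
    let result := if neg then -q else q
    if result < -2 ^ 31 ∨ result > 2 ^ 31 - 1 then 2 ^ 31 - 1 else result

-- ===== PRECONDITION & SPEC =====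
-- Pre_ excludes divisor == 0 with dividend != 0: there Python A's `while True` loop never
-- terminates (and B's shift-search loop does not either); A returns on every other input.
def Pre_divide2 (dividend : Int) (divisor : Int) : Prop := dividend = 0 ∨ divisor ≠ 0
instance (dividend : Int) (divisor : Int) : Decidable (Pre_divide2 dividend divisor) := by unfold Pre_divide2; infer_instance
def pvWitness_divide2 : Int × Int := (7, -2)

def Spec_divide2 (dividend : Int) (divisor : Int) (out : Int) : Prop := out = divide2_alt dividend divisor
instance (dividend : Int) (divisor : Int) (out : Int) : Decidable (Spec_divide2 dividend divisor out) := by unfold Spec_divide2; infer_instance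

-- ===== CLAIM (what is proved, stated in full; the proofs are below) =====
def Claim_equal_divide2 : Prop := ∀ (dividend : Int) (divisor : Int), Dom_divide2 dividend divisor → Pre_divide2 dividend divisor → Spec_divide2 dividend divisor (divide2 dividend divisor)

-- ===== LEMMAS AND PROOFS =====

-- (x + n*b)/b = x/b + n
lemma ediv_sub_mul (x n b : Int) (hb : b ≠ 0) : (x - n * b) / b = x / b - n := by
  have := Int.add_mul_ediv_right x (-n) hb
  simpa [sub_eq_add_neg, neg_mul] using this

lemma popA_nil (a sum : Int) :
    ∀ (stack : List (Int × Int)) (hp hp' : Bool),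
    pvPopA a sum stack hp = ([], hp') → ∀ x ∈ stack, sum + x.2 > a := by
  intro stack
  induction stack with
  | nil => intro hp hp' _ x hx; cases hx
  | cons y t ih =>
    intro hp hp' h x hx
    obtain ⟨n, s⟩ := y
    by_cases hc : sum + s > a
    · simp only [pvPopA, if_pos hc] at h
      rcases List.mem_cons.mp hx with hx | hx
      · simpa [hx]
      · exact ih true hp' h x hx
    · simp [pvPopA, if_neg hc] at h

lemma popA_cons (a sum : Int) :
    ∀ (stack : List (Int × Int)) (hp hp' : Bool) (n s : Int) (t : List (Int × Int)),
    pvPopA a sum stack hp = ((n, s) :: t, hp') →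
    sum + s ≤ a ∧ ((n, s) :: t) <:+ stack := by
  intro stack
  induction stack with
  | nil => intro hp hp' n s t h; simp [pvPopA] at h
  | cons y r ih =>
    intro hp hp' n s t h
    obtain ⟨m, u⟩ := y
    by_cases hc : sum + u > a
    · simp only [pvPopA, if_pos hc] at h
      obtain ⟨h1, h2⟩ := ih true hp' n s t h
      exact ⟨h1, h2.trans (List.suffix_cons _ _)⟩
    · rw [pvPopA, if_neg hc] at h
      injection h with h1 _
      injection h1 with hh ht
      obtain ⟨rfl, rfl⟩ := Prod.mk.inj hh
      subst ht
      exact ⟨by omega, List.suffix_refl _⟩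

lemma getLast?_of_suffix {α : Type} {l₁ l₂ : List α} (h : l₁ <:+ l₂) (hne : l₁ ≠ []) :
    l₂.getLast? = l₁.getLast? := by
  obtain ⟨pre, rfl⟩ := h
  rw [List.getLast?_append_of_ne_nil pre hne]

lemma outerA_eq (a b : Int) (hb : 1 ≤ b) :
    ∀ (fuel : Nat) (sum result : Int) (stack : List (Int × Int)),
    sum ≤ a →
    (a - sum).toNat < fuel →
    (∀ x ∈ stack, x.2 = x.1 * b ∧ 1 ≤ x.1) →
    stack.getLast? = some (1, b) →
    pvOuterA a fuel sum result stack = result + (a - sum) / b := by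
  intro fuel
  induction fuel with
  | zero => intro sum result stack _ hf _ _; omega
  | succ fuel ih =>
    intro sum result stack hsum hf hinv hlast
    rcases hpop : pvPopA a sum stack false with ⟨st, hp⟩
    cases st with
    | nil =>
      have hall := popA_nil a sum stack false hp hpop
      have hmem : (1, b) ∈ stack := List.mem_of_getLast? hlast
      have hgt : sum + b > a := by simpa using hall (1, b) hmem
      have h0 : (a - sum) / b = 0 :=
        Int.ediv_eq_zero_of_lt (by omega) (by omega)
      simp [pvOuterA, hpop, h0]
    | cons y t =>
      obtain ⟨n, s⟩ := y
      obtain ⟨hle, hsuf⟩ := popA_cons a sum stack false hp n s t hpop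
      have hmem : ∀ x ∈ (n, s) :: t, x.2 = x.1 * b ∧ 1 ≤ x.1 := fun x hx =>
        hinv x (hsuf.subset hx)
      obtain ⟨hs0, hn0⟩ := hmem (n, s) (by simp)
      have hs : s = n * b := hs0
      have hn : (1 : Int) ≤ n := hn0
      have hs1 : 1 ≤ s := by rw [hs]; nlinarith
      have hlast' : ((n, s) :: t).getLast? = some (1, b) := by
        rw [← getLast?_of_suffix hsuf (by simp)]; exact hlast
      have hinv' : ∀ x ∈ (if hp then (n, s) :: t else (2 * n, 2 * s) :: (n, s) :: t),
          x.2 = x.1 * b ∧ 1 ≤ x.1 := by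
        cases hp with
        | true => simpa using hmem
        | false =>
          simp only [if_neg (Bool.false_ne_true)]
          intro x hx
          rcases List.mem_cons.mp hx with hx | hx
          · subst hx
            exact ⟨by simp only; rw [hs]; ring, by simp only; omega⟩
          · exact hmem x hx
      have hlast'' : (if hp then (n, s) :: t else (2 * n, 2 * s) :: (n, s) :: t).getLast?
          = some (1, b) := by
        cases hp with
        | true => simpa using hlast'
        | false => simpa using hlast'
      have := ih (sum + s) (result + n)
        (if hp then (n, s) :: t else (2 * n, 2 * s) :: (n, s) :: t)
        (by omega) (by omega) hinv' hlast''
      calc pvOuterA a (fuel + 1) sum result stack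
          = pvOuterA a fuel (sum + s) (result + n)
              (if hp then (n, s) :: t else (2 * n, 2 * s) :: (n, s) :: t) := by
            simp [pvOuterA, hpop]
        _ = result + n + (a - (sum + s)) / b := this
        _ = result + (a - sum) / b := by
            have : a - (sum + s) = (a - sum) - n * b := by rw [hs]; ring
            rw [this, ediv_sub_mul _ _ _ (by omega)]; ring

lemma outerA_div (a b : Int) (ha : 0 ≤ a) (hb : 1 ≤ b) :
    pvOuterA a (a.toNat + 1) 0 0 [(1, b)] = a / b := by
  have := outerA_eq a b hb (a.toNat + 1) 0 0 [(1, b)]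
    (by omega) (by omega)
    (by intro x hx; simp at hx; subst hx; simp)
    (by simp)
  simpa using this

lemma bitsB_eq (b : Int) (hb : 1 ≤ b) :
    ∀ (i : Nat) (rem q : Int), 0 ≤ rem → rem < b * 2 ^ (i + 1) →
    pvBitsB b i rem q = q + rem / b := by
  intro i
  induction i with
  | zero =>
    intro rem q h0 h1
    have h1' : rem < 2 * b := by
      have : b * 2 ^ (0 + 1) = 2 * b := by ring
      omega
    by_cases hc : b ≤ rem
    · have hdiv : rem / b = 1 := by
        have he := ediv_sub_mul rem 1 b (by omega)
        have hz : (rem - 1 * b) / b = 0 :=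
          Int.ediv_eq_zero_of_lt (by omega) (by omega)
        rw [hz] at he
        omega
      simp [pvBitsB, if_pos hc, hdiv]
    · have : rem / b = 0 := Int.ediv_eq_zero_of_lt h0 (by omega)
      simp [pvBitsB, if_neg hc, this]
  | succ i ih =>
    intro rem q h0 h1
    by_cases hc : b * 2 ^ (i + 1) ≤ rem
    · have h2 : rem - b * 2 ^ (i + 1) < b * 2 ^ (i + 1) := by
        have : b * 2 ^ (i + 1 + 1) = 2 * (b * 2 ^ (i + 1)) := by ring
        omega
      rw [pvBitsB, if_pos hc, ih _ _ (by linarith) h2]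
      have : rem - b * 2 ^ (i + 1) = rem - (2 ^ (i + 1)) * b := by ring
      rw [this, ediv_sub_mul _ _ _ (by omega)]
      ring
    · rw [pvBitsB, if_neg hc, ih _ _ h0 (by omega)]

lemma findK_spec (a b : Int) (hb : 1 ≤ b) :
    ∀ (fuel i : Nat), a < b * 2 ^ (i + fuel) →
    a < b * 2 ^ (pvFindK a b fuel i + 1) := by
  intro fuel
  induction fuel with
  | zero =>
    intro i h
    have hle : (b : Int) * 2 ^ i ≤ b * 2 ^ (i + 1) := by
      have h2 : (2 : Int) ^ i ≤ 2 ^ (i + 1) := by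
        exact pow_le_pow_right₀ (by norm_num : (1:Int) ≤ 2) (Nat.le_succ i)
      nlinarith
    simp only [pvFindK]
    simp only [Nat.add_zero] at h
    omega
  | succ fuel ih =>
    intro i h
    by_cases hc : b * 2 ^ (i + 1) ≤ a
    · rw [pvFindK, if_pos hc]
      exact ih (i + 1) (by rw [show i + 1 + fuel = i + (fuel + 1) by omega]; exact h)
    · rw [pvFindK, if_neg hc]
      omega

lemma altB_div (a b : Int) (ha : 0 ≤ a) (hb : 1 ≤ b) :
    pvBitsB b (pvFindK a b (a.toNat + 1) 0) a 0 = a / b := by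
  have hstart : a < b * 2 ^ (0 + (a.toNat + 1)) := by
    have h1 : (a.toNat : Int) < 2 ^ (a.toNat + 1) := by
      exact_mod_cast Nat.lt_two_pow_self.trans_le
        (Nat.pow_le_pow_right (by norm_num) (Nat.le_succ _))
    have h2 : (1 : Int) * 2 ^ (a.toNat + 1) ≤ b * 2 ^ (a.toNat + 1) := by
      have : (0 : Int) < 2 ^ (a.toNat + 1) := by positivity
      nlinarith
    have ha' : (a.toNat : Int) = a := Int.toNat_of_nonneg ha
    simp only [Nat.zero_add]
    omega
  have hk := findK_spec a b hb (a.toNat + 1) 0 hstart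
  simpa using bitsB_eq b hb _ a 0 ha hk

-- ===== VERDICT (by name: the statement is the Claim_ definition above) =====
theorem divide2_spec : Claim_equal_divide2 := by
  intro dividend divisor _ hpre
  unfold Spec_divide2 divide2 divide2_alt
  by_cases hd : dividend = 0
  · simp [hd]
  · have hv : divisor ≠ 0 := by
      rcases hpre with h | h
      · exact absurd h hd
      · exact h
    have ha : (0 : Int) ≤ |dividend| := abs_nonneg _
    have hb : (1 : Int) ≤ |divisor| := Int.one_le_abs hv
    simp only [if_neg hd]
    rw [outerA_div _ _ ha hb, altB_div _ _ ha hb]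
    rcases lt_or_gt_of_ne hd with h1 | h1 <;> rcases lt_or_gt_of_ne hv with h2 | h2 <;>
      simp [h1, h2, h1.not_gt, h2.not_gt]
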